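-- pv_equiv track=rewrite | github.com/jwburke256/UofOregon-CIS210 | Week7/p71_majors.py | majors_analysis
-- ===== SOURCE A (Python) =====
-- def majors_analysis(majorsli):
--     '''
--     (List) -> Tuple
--
--     Takes a list of majors and returns a tuple that has a list of the most
--     common majors and the number of occurences in the list.
--
--     >>> majors_analysis(['CIS', 'CIS', 'EXPL', 'COLT', 'EXPL'])
--     (['CIS', 'EXPL'], 3)
--     '''
--     countDict = {}
--     majorCount = 0
--
--
--     for item in majorsli: #creates a dictionary that holds each list item and number of times the item appears
--         if item in countDict:
--             countDict[item] = countDict[item] + 1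
--         else:
--             countDict[item] = 1
--             majorCount += 1
--     countList = countDict.values() #makes a list that only has the count number of items
--     maxCount = max(countList) #finds out the highest number of occurences in the original list using countList
--     modeList = [] #adds the items from countDict that have the highest occurence to  modeList
--     for item in countDict:
--         if countDict[item] == maxCount:
--             modeList.append(item)
--     majorTuple = (modeList, majorCount)
--     return majorTuple
-- ===== SOURCE B (Python) =====
-- def majors_analysis(majorsli):
--     '''
--     (List) -> Tuple
--
--     Same result as A, via an inverted index: map each count value to the
--     list of majors having that count, then pick the bucket of the max count.
--     '''
--     countDict = {}
--     for item in majorsli: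
--         countDict[item] = countDict.get(item, 0) + 1
--     countToMajors = {}
--     for major, count in countDict.items():
--         countToMajors[count] = countToMajors.get(count, []) + [major]
--     maxCount = max(countToMajors)  # ValueError on empty input, like A's max([])
--     return (countToMajors[maxCount], len(countDict))
-- ===== Notes on version B (the rewrite author's own statement) =====
-- stated objective: alternative
-- what changed: Replaces A's second scan over the dict (re-reading each count and comparing with the max of the values) by an inverted index count->majors built once, so the mode list is a single dict lookup at the max key; the distinct-major count becomes len(countDict) instead of a hand-maintained counter.
import Mathlib
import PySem

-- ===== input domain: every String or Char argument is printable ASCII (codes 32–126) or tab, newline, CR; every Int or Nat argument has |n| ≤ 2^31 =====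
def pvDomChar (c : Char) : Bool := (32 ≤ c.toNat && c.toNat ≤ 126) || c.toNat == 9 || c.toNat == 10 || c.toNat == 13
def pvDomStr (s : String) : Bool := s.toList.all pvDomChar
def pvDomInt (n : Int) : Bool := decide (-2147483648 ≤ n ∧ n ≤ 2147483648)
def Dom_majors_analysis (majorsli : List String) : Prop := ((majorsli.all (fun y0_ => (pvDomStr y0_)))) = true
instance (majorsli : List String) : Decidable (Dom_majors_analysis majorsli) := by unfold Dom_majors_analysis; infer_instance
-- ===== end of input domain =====

-- B replaces A's second scan over the dict by an inverted index count -> majors built once,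
-- so the mode list is a single lookup at the max count; same asymptotic cost (objective: alternative).

-- ===== PORT A =====
def majors_analysis (majorsli : List String) : List String × Int :=
  let st := majorsli.foldl
    (fun (p : PySem.Dict String Int × Int) item =>
      match p.1.get? item with          -- 'if item in countDict' (lookup used in the then-branch)
      | some v => (p.1.insert item (v + 1), p.2)
      | none   => (p.1.insert item 1, p.2 + 1))
    (PySem.Dict.empty, 0)
  let countDict := st.1
  let majorCount := st.2
  let countList := countDict.values
  match PySem.List.max? countList (fun x => x) with
  | none => ([], 0)                     -- Python raises ValueError here (max of empty); excluded by Pre_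
  | some maxCount =>
    let modeList := countDict.keys.foldl
      (fun acc item => if countDict.getD item 0 == maxCount then acc ++ [item] else acc) []
      -- countDict[item]: key always present while iterating the dict, so getD 0 is exact
    (modeList, majorCount)

-- ===== PORT B =====
def majors_analysis_alt (majorsli : List String) : List String × Int :=
  let countDict := majorsli.foldl
    (fun d item => d.insert item (d.getD item 0 + 1)) PySem.Dict.empty
  let countToMajors := countDict.items.foldl
    (fun (m : PySem.Dict Int (List String)) p => m.insert p.2 (m.getD p.2 [] ++ [p.1]))
    PySem.Dict.empty
  match PySem.List.max? countToMajors.keys (fun x => x) with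
  | none => ([], 0)                     -- Python raises ValueError here (max of empty); excluded by Pre_
  | some maxCount => (countToMajors.getD maxCount [], (countDict.size : Int))

-- ===== PRECONDITION & SPEC =====
-- On the empty list both Pythons raise ValueError (max of an empty sequence); excluded.
def Pre_majors_analysis (majorsli : List String) : Prop := majorsli ≠ []
instance (majorsli : List String) : Decidable (Pre_majors_analysis majorsli) := by
  unfold Pre_majors_analysis; infer_instance
def pvWitness_majors_analysis : List String := ["CIS", "CIS", "EXPL", "COLT", "EXPL"]

def Spec_majors_analysis (majorsli : List String) (out : List String × Int) : Prop := out = majors_analysis_alt majorsli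
instance (majorsli : List String) (out : List String × Int) : Decidable (Spec_majors_analysis majorsli out) := by unfold Spec_majors_analysis; infer_instance

-- ===== CLAIM (what is proved, stated in full; the proofs are below) =====
def Claim_equal_majors_analysis : Prop := ∀ (majorsli : List String), Dom_majors_analysis majorsli → Pre_majors_analysis majorsli → Spec_majors_analysis majorsli (majors_analysis majorsli)

-- ===== LEMMAS AND PROOFS =====

-- A's first loop carries (dict, distinct counter); it equals B's first loop paired with the dict's size.
theorem loopA_eq (xs : List String) (d : PySem.Dict String Int) :
    xs.foldl
      (fun (p : PySem.Dict String Int × Int) item =>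
        match p.1.get? item with
        | some v => (p.1.insert item (v + 1), p.2)
        | none   => (p.1.insert item 1, p.2 + 1))
      (d, (d.size : Int))
    = (xs.foldl (fun d item => d.insert item (d.getD item 0 + 1)) d,
       ((xs.foldl (fun d item => d.insert item (d.getD item 0 + 1)) d).size : Int)) := by
  induction xs generalizing d with
  | nil => rfl
  | cons x xs ih =>
    simp only [List.foldl_cons]
    cases h : d.get? x with
    | some v =>
      have hc : d.contains x = true := by
        rw [PySem.Dict.contains_eq_isSome_get?, h]; rfl
      have hsz : (d.insert x (v + 1)).size = d.size := by
        rw [PySem.Dict.size_insert, if_pos hc]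
      have hD : d.getD x 0 = v := by simp [PySem.Dict.getD, h]
      simpa [h, hD, hsz] using ih (d.insert x (v + 1))
    | none =>
      have hc : d.contains x = false := by
        have := PySem.Dict.contains_eq_isSome_get? d x
        rw [h] at this; simpa using this
      have hsz : ((d.insert x 1).size : Int) = (d.size : Int) + 1 := by
        rw [PySem.Dict.size_insert, if_neg (by simp [hc])]; push_cast; ring
      have hD : d.getD x 0 = 0 := by simp [PySem.Dict.getD, h]
      simpa [h, hD, hsz] using ih (d.insert x 1)

-- the inverted-index fold: lookup at v collects, in order, the majors whose count is v
theorem invIdx_getD (ps : List (String × Int)) (m : PySem.Dict Int (List String)) (v : Int) :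
    (ps.foldl (fun m p => m.insert p.2 (m.getD p.2 [] ++ [p.1])) m).getD v []
    = m.getD v [] ++ (ps.filter (fun p => p.2 == v)).map Prod.fst := by
  induction ps generalizing m with
  | nil => simp
  | cons p ps ih =>
    simp only [List.foldl_cons, ih, PySem.Dict.getD_insert]
    by_cases hv : v = p.2
    · simp [hv]
    · simp [hv, Ne.symm hv]

-- the inverted-index fold: its key set is the set of counts occurring among the items
theorem invIdx_contains (ps : List (String × Int)) (m : PySem.Dict Int (List String)) (v : Int) :
    (ps.foldl (fun m p => m.insert p.2 (m.getD p.2 [] ++ [p.1])) m).contains v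
    = (m.contains v || (ps.map Prod.snd).contains v) := by
  induction ps generalizing m with
  | nil => simp
  | cons p ps ih =>
    simp only [List.foldl_cons, ih, PySem.Dict.contains_insert, List.map_cons,
      List.contains_cons]
    by_cases h : v = p.2
    · simp [h]
    · rw [Bool.or_left_comm, Bool.or_assoc]

-- max? (with identity key) of two Int lists with the same members is the same
theorem max?_congr_mem (l₁ l₂ : List Int) (h : ∀ v, v ∈ l₁ ↔ v ∈ l₂) :
    PySem.List.max? l₁ (fun x => x) = PySem.List.max? l₂ (fun x => x) := by
  cases h₁ : PySem.List.max? l₁ (fun x => x) with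
  | none =>
    rw [PySem.List.max?_eq_none_iff] at h₁
    subst h₁
    have : l₂ = [] := by
      cases l₂ with
      | nil => rfl
      | cons a t => exact absurd ((h a).mpr (List.mem_cons_self)) (List.not_mem_nil)
    rw [this]
    rfl
  | some m₁ =>
    cases h₂ : PySem.List.max? l₂ (fun x => x) with
    | none =>
      rw [PySem.List.max?_eq_none_iff] at h₂
      subst h₂
      exact absurd ((h m₁).mp (PySem.List.max?_mem h₁)) (List.not_mem_nil)
    | some m₂ =>
      have le₁ : m₁ ≤ m₂ := PySem.List.max?_isMax h₂ m₁ ((h m₁).mp (PySem.List.max?_mem h₁))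
      have le₂ : m₂ ≤ m₁ := PySem.List.max?_isMax h₁ m₂ ((h m₂).mpr (PySem.List.max?_mem h₂))
      rw [le_antisymm le₁ le₂]

-- ===== VERDICT (by name: the statement is the Claim_ definition above) =====
theorem majors_analysis_spec : Claim_equal_majors_analysis := by
  intro xs _ hne
  unfold Spec_majors_analysis majors_analysis majors_analysis_alt
  have hfold := loopA_eq xs PySem.Dict.empty
  rw [PySem.Dict.size_empty, PySem.Dict.foldl_insert_getD_add_one_eq_counter] at hfold
  simp only [Nat.cast_zero] at hfold
  simp only [hfold, PySem.Dict.foldl_insert_getD_add_one_eq_counter]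
  set cnt := PySem.Dict.counter xs with hcnt
  set c2m := cnt.items.foldl
    (fun (m : PySem.Dict Int (List String)) p => m.insert p.2 (m.getD p.2 [] ++ [p.1]))
    PySem.Dict.empty with hc2m
  -- same max: c2m's keys and cnt's values have the same members
  have hmem : ∀ v, v ∈ cnt.values ↔ v ∈ c2m.keys := by
    intro v
    have := invIdx_contains cnt.items PySem.Dict.empty v
    rw [← hc2m, PySem.Dict.contains_empty] at this
    have hk : c2m.contains v = true ↔ v ∈ c2m.keys := by
      rw [PySem.Dict.contains_eq_decide_mem_keys]; simp
    rw [← hk, this]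
    simp [PySem.Dict.values]
  have hmax : PySem.List.max? cnt.values (fun x => x)
      = PySem.List.max? c2m.keys (fun x => x) :=
    max?_congr_mem _ _ hmem
  rw [← hmax]
  cases hm : PySem.List.max? cnt.values (fun x => x) with
  | none => rfl
  | some mx =>
    -- mode lists agree
    have hA : cnt.keys.foldl
        (fun acc item => if cnt.getD item 0 == mx then acc ++ [item] else acc) []
        = (cnt.keys.filter (fun k => cnt.getD k 0 == mx)) := by
      simpa using PySem.List.foldl_append_if (fun k => cnt.getD k 0 == mx) (fun k => k) cnt.keys []
    have hB : c2m.getD mx [] = (cnt.items.filter (fun p => p.2 == mx)).map Prod.fst := by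
      rw [hc2m, invIdx_getD, PySem.Dict.getD_empty]; simp
    have hitems : cnt.items
        = (PySem.Set.ofList xs).map (fun k => (k, (xs.count k : Int))) := by
      simpa using PySem.Dict.items_counter xs
    have hkeys : cnt.keys = PySem.Set.ofList xs := PySem.Dict.keys_counter xs
    simp only [hA, hB]
    simp only [hitems, hkeys, List.filter_map, List.map_map,
      Prod.mk.injEq, and_true]
    rw [show ((fun (p : String × Int) => p.1) ∘ fun k => (k, (List.count k xs : Int)))
        = fun k => k from rfl, List.map_id']
    apply List.filter_congr
    intro k _
    simp [Function.comp, hcnt, PySem.Dict.getD_counter]
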